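-- pv_equiv track=rewrite | github.com/parsaalian/web2comp | visca/virtual_node/build_tree.py | parse_xpath
-- ===== SOURCE A (Python) =====
-- from typing import List, Dict
--
-- def parse_xpath(xpath: str) -> List[str]:
--     """
--     Parses an XPath into a list of its segments.
--     Example: /html[1]/body[1] -> ['/html[1]', '/html[1]/body[1]']
--              //div[1]/span[1] -> ['//div[1]', '//div[1]/span[1]']
--     """
--     if not xpath:
--         return []
--
--     # Handle // prefix carefully
--     prefix = ""
--     path_to_split = xpath
--     if xpath.startswith("//"):
--         prefix = "//"
--         path_to_split = xpath[2:]
--     elif xpath.startswith("/"):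
--         prefix = "/"
--         path_to_split = xpath[1:]
--
--     segments = [part for part in path_to_split.split('/') if part]
--
--     # Reconstruct full path segments
--     full_path_segments = []
--     for i, segment in enumerate(segments):
--         if i == 0 and prefix in ["/", "//"]:
--             full_path_segments.append(prefix + segment)
--         elif i > 0 :
--             current_path = full_path_segments[-1] + "/" + segment
--             full_path_segments.append(current_path)
--         else:
--             full_path_segments.append(segment)
--
--     return full_path_segments
-- ===== SOURCE B (Python) =====
-- from typing import List
--
-- def parse_xpath(xpath: str) -> List[str]:
--     if not xpath:
--         return []
--     prefix = "//" if xpath.startswith("//") else "/" if xpath.startswith("/") else ""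
--     segments = [part for part in xpath[len(prefix):].split('/') if part]
--     return [prefix + '/'.join(segments[:i + 1]) for i in range(len(segments))]
-- ===== Notes on version B (the rewrite author's own statement) =====
-- stated objective: simpler
-- what changed: Replaces the accumulator loop that extends the previous result element with a stateless comprehension building each cumulative path from scratch as prefix + '/'.join(segments[:i+1]).
import Mathlib
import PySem

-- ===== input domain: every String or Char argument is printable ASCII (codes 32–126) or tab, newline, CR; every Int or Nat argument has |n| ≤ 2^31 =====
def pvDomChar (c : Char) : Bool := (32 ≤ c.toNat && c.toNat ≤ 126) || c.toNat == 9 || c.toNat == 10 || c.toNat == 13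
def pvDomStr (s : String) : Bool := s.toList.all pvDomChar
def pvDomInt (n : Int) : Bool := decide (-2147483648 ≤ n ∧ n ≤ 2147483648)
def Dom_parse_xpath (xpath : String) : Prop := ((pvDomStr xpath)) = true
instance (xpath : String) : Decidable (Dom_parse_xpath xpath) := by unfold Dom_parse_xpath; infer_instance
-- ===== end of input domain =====

-- B replaces A's accumulator loop (each path built by extending the previous result element)
-- with a stateless comprehension building each cumulative path from scratch: simpler decomposition.

-- ===== PORT A =====
-- A's loop body: i == 0 with prefix in ["/", "//"]; i > 0 extends full_path_segments[-1];
-- else (i == 0, prefix == "") appends the bare segment. full_path_segments[-1] is ported with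
-- pyGet?; the .getD [] default is never reached (i > 0 implies the accumulator is non-empty).
def parseXpathStepA (pre : List Char) (acc : List (List Char)) (p : Int × List Char) : List (List Char) :=
  if p.1 = 0 ∧ (pre = ['/'] ∨ pre = ['/', '/']) then acc ++ [pre ++ p.2]
  else if p.1 > 0 then acc ++ [((PySem.List.pyGet? acc (-1)).getD []) ++ '/' :: p.2]
  else acc ++ [p.2]

def parse_xpath (xpath : String) : List String :=
  let s := xpath.toList
  if s = [] then []
  else
    let pp : List Char × List Char :=
      if PySem.Chars.startswith s ['/', '/'] then (['/', '/'], PySem.Chars.slice s (some 2) none)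
      else if PySem.Chars.startswith s ['/'] then (['/'], PySem.Chars.slice s (some 1) none)
      else ([], s)
    let segments := (PySem.Chars.splitOn pp.2 ['/']).filter (fun part => part ≠ [])
    let full := (PySem.List.enumerate segments).foldl (parseXpathStepA pp.1) []
    full.map String.ofList

-- ===== PORT B =====
def parse_xpath_alt (xpath : String) : List String :=
  let s := xpath.toList
  if s = [] then []
  else
    let pre : List Char :=
      if PySem.Chars.startswith s ['/', '/'] then ['/', '/']
      else if PySem.Chars.startswith s ['/'] then ['/']
      else []
    let segments := (PySem.Chars.splitOn (PySem.Chars.slice s (some (pre.length : Int)) none) ['/']).filter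
      (fun part => part ≠ [])
    (List.range segments.length).map
      (fun (i : Nat) =>
        String.ofList (pre ++ PySem.Chars.join ['/'] (PySem.List.slice segments none (some ((i : Int) + 1)))))

-- ===== PRECONDITION & SPEC =====
def Spec_parse_xpath (xpath : String) (out : List String) : Prop := out = parse_xpath_alt xpath
instance (xpath : String) (out : List String) : Decidable (Spec_parse_xpath xpath out) := by unfold Spec_parse_xpath; infer_instance

-- ===== CLAIM (what is proved, stated in full; the proofs are below) =====
def Claim_equal_parse_xpath : Prop := ∀ (xpath : String), Dom_parse_xpath xpath → Spec_parse_xpath xpath (parse_xpath xpath)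

-- ===== LEMMAS AND PROOFS =====

-- the list A's i > 0 branch produces after a non-empty accumulator whose last element is `last`
def pvChain (last : List Char) : List (List Char) → List (List Char)
  | [] => []
  | s :: rest => (last ++ '/' :: s) :: pvChain (last ++ '/' :: s) rest

theorem pvGetLast_concat {α : Type} (acc : List α) (x : α) (d : α) :
    (PySem.List.pyGet? (acc ++ [x]) (-1)).getD d = x := by
  simp [PySem.List.pyGet?, PySem.List.pyIdx?]

theorem pvTake_ne_nil (rest : List (List Char)) (i : Nat) (hi : i < rest.length) :
    rest.take (i + 1) ≠ [] := by
  intro h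
  rcases List.take_eq_nil_iff.mp h with h' | h'
  · omega
  · subst h'
    simp at hi

theorem pvJoin_cons_take (s : List Char) (rest : List (List Char)) (i : Nat)
    (hi : i < rest.length) :
    PySem.Chars.join ['/'] ((s :: rest).take (i + 1 + 1)) =
      s ++ '/' :: PySem.Chars.join ['/'] (rest.take (i + 1)) := by
  rw [List.take_succ_cons]
  cases h : rest.take (i + 1) with
  | nil => exact absurd h (pvTake_ne_nil rest i hi)
  | cons a b => rw [PySem.Chars.join_cons_cons]; simp

theorem pvFoldl_chain (pre : List Char) (tail : List (List Char)) (acc : List (List Char))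
    (x : List Char) (k : Int) (hk : 0 < k) :
    (PySem.List.enumerate tail k).foldl (parseXpathStepA pre) (acc ++ [x]) =
      (acc ++ [x]) ++ pvChain x tail := by
  induction tail generalizing acc x k with
  | nil => simp [PySem.List.enumerate_nil, pvChain]
  | cons s rest ih =>
      rw [PySem.List.enumerate_cons]
      simp only [List.foldl_cons]
      have hstep : parseXpathStepA pre (acc ++ [x]) (k, s) =
          (acc ++ [x]) ++ [x ++ '/' :: s] := by
        unfold parseXpathStepA
        rw [if_neg (by simp; omega), if_pos (by simpa using hk), pvGetLast_concat]
      rw [hstep, ih (acc ++ [x]) (x ++ '/' :: s) (k + 1) (by omega)]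
      simp [pvChain]

theorem pvChain_eq_map (tail : List (List Char)) (last : List Char) :
    pvChain last tail =
      (List.range tail.length).map
        (fun i => last ++ '/' :: PySem.Chars.join ['/'] (tail.take (i + 1))) := by
  induction tail generalizing last with
  | nil => simp [pvChain]
  | cons s rest ih =>
      simp only [pvChain, List.length_cons, List.range_succ_eq_map, List.map_cons, List.map_map]
      congr 1
      · simp [PySem.Chars.join_singleton]
      · rw [ih]
        apply List.map_congr_left
        intro i hi
        simp only [List.mem_range] at hi
        simp only [Function.comp_apply, Nat.succ_eq_add_one]
        rw [pvJoin_cons_take s rest i hi]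
        simp

-- B's slice segments[:i+1] is List.take (i+1) for i in range
theorem pvSlice_take (segs : List (List Char)) (i : Nat) :
    PySem.List.slice segs none (some ((i : Int) + 1)) = segs.take (i + 1) := by
  rw [show ((i : Int) + 1) = ((i + 1 : Nat) : Int) by push_cast; ring,
      PySem.List.slice_to_natCast]

-- the core equality: A's accumulator loop equals B's per-index rebuild, for the three prefixes
theorem pvLoop_eq (pre : List Char) (segs : List (List Char))
    (hpre : pre = [] ∨ pre = ['/'] ∨ pre = ['/', '/']) :
    (PySem.List.enumerate segs).foldl (parseXpathStepA pre) [] =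
      (List.range segs.length).map
        (fun (i : Nat) => pre ++ PySem.Chars.join ['/'] (PySem.List.slice segs none (some ((i : Int) + 1)))) := by
  have hrhs : (List.range segs.length).map
        (fun (i : Nat) => pre ++ PySem.Chars.join ['/'] (PySem.List.slice segs none (some ((i : Int) + 1)))) =
      (List.range segs.length).map
        (fun (i : Nat) => pre ++ PySem.Chars.join ['/'] (segs.take (i + 1))) := by
    apply List.map_congr_left
    intro i _
    rw [pvSlice_take]
  rw [hrhs]
  cases segs with
  | nil => simp [PySem.List.enumerate_nil]
  | cons s0 rest =>
      rw [PySem.List.enumerate_cons]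
      simp only [List.foldl_cons]
      have h0 : parseXpathStepA pre [] (0, s0) = [] ++ [pre ++ s0] := by
        unfold parseXpathStepA
        rcases hpre with h | h | h <;> simp [h]
      rw [h0, pvFoldl_chain pre rest [] (pre ++ s0) (0 + 1) (by omega), pvChain_eq_map]
      rw [List.length_cons, List.range_succ_eq_map, List.map_cons, List.map_map]
      simp only [List.nil_append, List.take_succ_cons, List.take_zero]
      rw [List.singleton_append]
      congr 1
      · simp [PySem.Chars.join_singleton]
      · apply List.map_congr_left
        intro i hi
        simp only [List.mem_range] at hi
        simp only [Function.comp_apply, Nat.succ_eq_add_one]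
        cases h : rest.take (i + 1) with
        | nil => exact absurd h (pvTake_ne_nil rest i hi)
        | cons a b => rw [PySem.Chars.join_cons_cons]; simp

-- A's slices xpath[2:] / xpath[1:] / xpath coincide with B's xpath[len(prefix):]
theorem pvSlice_len (s : List Char) :
    PySem.Chars.slice s (some ((0 : Nat) : Int)) none = s := by
  simp [PySem.Chars.slice_eq_listSlice]

-- ===== VERDICT (by name: the statement is the Claim_ definition above) =====
theorem parse_xpath_spec : Claim_equal_parse_xpath := by
  intro xpath _
  unfold Spec_parse_xpath parse_xpath parse_xpath_alt
  simp only
  by_cases hnil : xpath.toList = []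
  · simp [hnil]
  · rw [if_neg hnil, if_neg hnil]
    by_cases h2 : PySem.Chars.startswith xpath.toList ['/', '/']
    · rw [if_pos h2, if_pos h2]
      rw [show ((['/', '/'] : List Char).length : Int) = ((2 : Nat) : Int) from rfl]
      rw [show (some ((2 : Nat) : Int)) = (some (2 : Int)) by norm_num]
      rw [pvLoop_eq ['/', '/'] _ (Or.inr (Or.inr rfl))]
      simp [List.map_map]
    · rw [if_neg h2, if_neg h2]
      by_cases h1 : PySem.Chars.startswith xpath.toList ['/']
      · rw [if_pos h1, if_pos h1]
        rw [show ((['/'] : List Char).length : Int) = ((1 : Nat) : Int) from rfl]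
        rw [show (some ((1 : Nat) : Int)) = (some (1 : Int)) by norm_num]
        rw [pvLoop_eq ['/'] _ (Or.inr (Or.inl rfl))]
        simp [List.map_map]
      · rw [if_neg h1, if_neg h1]
        rw [show (([] : List Char).length : Int) = ((0 : Nat) : Int) from rfl, pvSlice_len]
        rw [pvLoop_eq [] _ (Or.inl rfl)]
        simp [List.map_map]
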